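-- pv_equiv track=rewrite | github.com/nytud/emLam | emLam/conversions.py | field_pos_kr
-- ===== SOURCE A (Python) =====
-- def field_pos_kr(fields):
--     kr = fields[2]
--     last_index = kr.find('<')
--     if last_index > 0:
--         ret = [kr[:last_index]]
--         while True:
--             index = kr.find('><', last_index)
--             if index > 0:
--                 ret.append(kr[last_index:index + 1])
--                 last_index = index + 1
--             else:
--                 ret.append(kr[last_index:])
--                 break
--         return ret
--     else:
--         return [kr]
-- ===== SOURCE B (Python) =====
-- def field_pos_kr(fields):
--     kr = fields[2]
--     idx = kr.find('<')
--     if idx <= 0: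
--         return [kr]
--     pieces = kr[idx:].split('><')
--     n = len(pieces)
--     return [kr[:idx]] + [('<' if i else '') + p + ('>' if i < n - 1 else '')
--                          for i, p in enumerate(pieces)]
-- ===== Notes on version B (the rewrite author's own statement) =====
-- stated objective: alternative
-- what changed: Replaces A's incremental find('><')-and-slice while-loop (which keeps delimiters inline) by a split-then-reassemble decomposition: split the body after the first '<' on '><' in one str.split call, then re-add the dropped '>'/'<' delimiters by position in a comprehension.
import Mathlib
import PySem

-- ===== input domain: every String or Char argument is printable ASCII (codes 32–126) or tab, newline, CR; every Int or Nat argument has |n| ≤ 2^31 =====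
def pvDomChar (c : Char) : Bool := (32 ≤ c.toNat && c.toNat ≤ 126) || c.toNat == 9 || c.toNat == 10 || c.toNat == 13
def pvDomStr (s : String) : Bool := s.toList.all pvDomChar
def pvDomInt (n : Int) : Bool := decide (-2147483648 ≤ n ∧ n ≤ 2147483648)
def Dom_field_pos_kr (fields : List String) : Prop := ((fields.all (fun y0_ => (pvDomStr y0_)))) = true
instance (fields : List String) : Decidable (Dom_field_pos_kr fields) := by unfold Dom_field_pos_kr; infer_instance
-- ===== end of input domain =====

-- B re-implements the segmentation as split-then-reassemble (split the body on '><' in one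
-- pass, then re-add the dropped delimiters by position) instead of A's incremental find-loop.

-- ===== PORT A =====
-- A's 'while True' loop; fuel = kr.length + 1 always suffices (last_index strictly grows each pass)
def fieldPosKrLoopA (kr : List Char) (fuel : Nat) (lastIndex : Int) (ret : List String) : List String :=
  match fuel with
  | 0 => ret
  | fuel + 1 =>
    let index := PySem.Chars.findFrom kr ['>', '<'] lastIndex
    if index > 0 then
      fieldPosKrLoopA kr fuel (index + 1)
        (ret ++ [String.ofList (PySem.List.slice kr (some lastIndex) (some (index + 1)))])
    else
      ret ++ [String.ofList (PySem.List.slice kr (some lastIndex) none)]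

-- ===== PORT A (entry) =====
def field_pos_kr (fields : List String) : List String :=
  match PySem.List.pyGet? fields 2 with
  | none => []
  | some kr =>
    let s := kr.toList
    let lastIndex := PySem.Chars.find s ['<']
    if lastIndex > 0 then
      fieldPosKrLoopA s (s.length + 1) lastIndex
        [String.ofList (PySem.List.slice s none (some lastIndex))]
    else [kr]

-- ===== PORT B =====
def field_pos_kr_alt (fields : List String) : List String :=
  match PySem.List.pyGet? fields 2 with
  | none => []
  | some kr =>
    let s := kr.toList
    let idx := PySem.Chars.find s ['<']
    if idx ≤ 0 then [kr]
    else
      let pieces := PySem.Chars.splitOn (s.drop idx.toNat) ['>', '<']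
      let n : Int := pieces.length
      String.ofList (s.take idx.toNat) ::
        (PySem.List.enumerate pieces 0).map (fun ip =>
          String.ofList ((if ip.1 ≠ 0 then ['<'] else []) ++ ip.2 ++
                         (if ip.1 < n - 1 then ['>'] else [])))


-- ===== PRECONDITION & SPEC =====
-- A evaluates fields[2]; Pre_ excludes exactly the inputs (fewer than 3 fields) where that raises IndexError.
def Pre_field_pos_kr (fields : List String) : Prop := 3 ≤ fields.length
instance (fields : List String) : Decidable (Pre_field_pos_kr fields) := by unfold Pre_field_pos_kr; infer_instance
def pvWitness_field_pos_kr : List String := ["alma", "NOUN", "alma<N><CAS<ACC>>"]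

def Spec_field_pos_kr (fields : List String) (out : List String) : Prop := out = field_pos_kr_alt fields
instance (fields : List String) (out : List String) : Decidable (Spec_field_pos_kr fields out) := by unfold Spec_field_pos_kr; infer_instance

-- ===== CLAIM (what is proved, stated in full; the proofs are below) =====
def Claim_equal_field_pos_kr : Prop := ∀ (fields : List String), Dom_field_pos_kr fields → Pre_field_pos_kr fields → Spec_field_pos_kr fields (field_pos_kr fields)

-- ===== LEMMAS AND PROOFS =====
def pvSep : List Char := ['>', '<']

theorem pv_find_nonneg_len {s : List Char} (h : 0 ≤ PySem.Chars.find s pvSep) :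
    (PySem.Chars.find s pvSep).toNat + 2 ≤ s.length := by
  obtain ⟨hp, -⟩ := PySem.Chars.find_spec h
  have h1 : pvSep.length ≤ (s.drop (PySem.Chars.find s pvSep).toNat).length := hp.length_le
  have h2 : pvSep.length = 2 := rfl
  have hd : (s.drop (PySem.Chars.find s pvSep).toNat).length =
      s.length - (PySem.Chars.find s pvSep).toNat := by simp
  omega

def pvSegs (s : List Char) : List (List Char) :=
  if h : PySem.Chars.find s pvSep < 0 then [s]
  else s.take ((PySem.Chars.find s pvSep).toNat + 1) ::
       pvSegs (s.drop ((PySem.Chars.find s pvSep).toNat + 1))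
termination_by s.length
decreasing_by
  have h2 := pv_find_nonneg_len (s := s) (by omega)
  simp only [List.length_drop]
  omega

def pvSplit (s : List Char) : List (List Char) :=
  if h : PySem.Chars.find s pvSep < 0 then [s]
  else s.take (PySem.Chars.find s pvSep).toNat ::
       pvSplit (s.drop ((PySem.Chars.find s pvSep).toNat + 2))
termination_by s.length
decreasing_by
  have h2 := pv_find_nonneg_len (s := s) (by omega)
  simp only [List.length_drop]
  omega

def pvRest : List (List Char) → List (List Char)
  | [] => []
  | p :: ps => ('<' :: (p ++ (if ps.isEmpty then [] else ['>']))) :: pvRest ps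

theorem pv_find_eq {s sub : List Char} {k : Nat} (h1 : sub <+: s.drop k)
    (h2 : ∀ i < k, ¬ sub <+: s.drop i) : PySem.Chars.find s sub = k := by
  have hnn : 0 ≤ PySem.Chars.find s sub := by
    rw [PySem.Chars.find_nonneg_iff]
    exact (PySem.Chars.isIn_iff_infix sub s).mp
      ((PySem.Chars.exists_prefix_drop_iff_isIn (sub := sub) (s := s)).mp ⟨k, h1⟩)
  obtain ⟨hp, hmin⟩ := PySem.Chars.find_spec hnn
  have h3 : ¬ (PySem.Chars.find s sub).toNat < k := fun h => h2 _ h hp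
  have h4 : ¬ k < (PySem.Chars.find s sub).toNat := fun h => hmin k h h1
  omega

theorem pv_find_neg {s sub : List Char} (h : ∀ i, ¬ sub <+: s.drop i) :
    PySem.Chars.find s sub = -1 := by
  rw [PySem.Chars.find_eq_neg_one_iff]
  intro hinf
  obtain ⟨i, hi⟩ := (PySem.Chars.exists_prefix_drop_iff_isIn (sub := sub) (s := s)).mpr
    ((PySem.Chars.isIn_iff_infix sub s).mpr hinf)
  exact h i hi

-- splitOn.go equations
theorem pv_go_nil (sep : List Char) (fuel cur acc) : PySem.Chars.splitOn.go sep (fuel+1) [] cur acc = (cur.reverse :: acc).reverse := rfl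
theorem pv_go_cons (sep : List Char) (fuel c rest cur acc) : PySem.Chars.splitOn.go sep (fuel+1) (c :: rest) cur acc =
    (if sep.isPrefixOf (c :: rest) then PySem.Chars.splitOn.go sep fuel (List.drop sep.length (c :: rest)) [] (cur.reverse :: acc)
     else PySem.Chars.splitOn.go sep fuel rest (c :: cur) acc) := rfl

theorem pv_go_inv : ∀ (fuel : Nat) (l cur : List Char) (acc : List (List Char)),
    l.length < fuel →
    (∀ i < cur.length, ¬ pvSep <+: (cur.reverse ++ l).drop i) →
    PySem.Chars.splitOn.go pvSep fuel l cur acc = acc.reverse ++ pvSplit (cur.reverse ++ l) := by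
  intro fuel
  induction fuel with
  | zero => intro l cur acc h; omega
  | succ fuel ih =>
    intro l cur acc hlen hocc
    match l with
    | [] =>
      rw [pv_go_nil]
      have hfind : PySem.Chars.find (cur.reverse ++ []) pvSep = -1 := by
        apply pv_find_neg
        intro i hpre
        have h2 : 2 ≤ ((cur.reverse ++ ([] : List Char)).drop i).length :=
          le_trans (by simp [pvSep]) hpre.length_le
        have h3 : ((cur.reverse ++ ([] : List Char)).drop i).length = cur.length - i := by simp
        exact hocc i (by omega) hpre
      rw [pvSplit, hfind]
      simp
    | c :: rest =>
      rw [pv_go_cons]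
      have hlen' : rest.length + 1 < fuel + 1 := by simpa using hlen
      by_cases hpre : pvSep.isPrefixOf (c :: rest)
      · rw [if_pos hpre]
        have hpre' : pvSep <+: (c :: rest) := List.isPrefixOf_iff_prefix.mp hpre
        have hfind : PySem.Chars.find (cur.reverse ++ c :: rest) pvSep = cur.length := by
          apply pv_find_eq (k := cur.length)
          · have hd : (cur.reverse ++ c :: rest).drop cur.length = c :: rest := by
              simp
            rw [hd]
            exact hpre'
          · exact hocc
        rw [ih _ _ _ (by have := hlen; simp [pvSep] at this ⊢; omega) (by intro i hi; simp at hi)]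
        conv_rhs => rw [pvSplit]
        rw [hfind]
        have hnn : ¬ ((cur.length : Int) < 0) := by omega
        rw [dif_neg hnn]
        have htake : (cur.reverse ++ c :: rest).take ((cur.length : Int)).toNat = cur.reverse := by
          simp
        have hdrop : (cur.reverse ++ c :: rest).drop (((cur.length : Int)).toNat + 2) =
            (c :: rest).drop pvSep.length := by
          rw [← List.drop_drop]
          congr 1
          · simp
        simp only [htake, hdrop]
        simp
      · rw [if_neg hpre]
        have heq : (c :: cur).reverse ++ rest = cur.reverse ++ c :: rest := by simp
        rw [ih _ _ _ (by omega) ?_]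
        · rw [heq]
        · intro i hi
          rw [heq]
          simp at hi
          rcases Nat.lt_or_ge i cur.length with h | h
          · exact hocc i h
          · have hie : i = cur.length := by omega
            subst hie
            have : (cur.reverse ++ c :: rest).drop cur.length = c :: rest := by
              simp
            rw [this]
            exact fun hc => hpre (List.isPrefixOf_iff_prefix.mpr hc)

theorem pv_splitOn_eq (s : List Char) : PySem.Chars.splitOn s pvSep = pvSplit s := by
  have := pv_go_inv (s.length + 1) s [] [] (by omega) (by intro i hi; simp at hi)
  simpa [PySem.Chars.splitOn] using this

theorem pv_prefix_drop {t : List Char} {i : Nat} :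
    pvSep <+: (('<' :: t).drop (i + 1)) ↔ pvSep <+: t.drop i := by simp

theorem pv_not_prefix_cons {t : List Char} : ¬ pvSep <+: ('<' :: t) := by
  intro h
  obtain ⟨v, hv⟩ := h
  simp [pvSep] at hv

theorem pv_find_cons (t : List Char) :
    PySem.Chars.find ('<' :: t) pvSep =
      (if PySem.Chars.find t pvSep = -1 then -1 else PySem.Chars.find t pvSep + 1) := by
  by_cases h : PySem.Chars.find t pvSep = -1
  · rw [if_pos h]
    apply pv_find_neg
    intro i
    match i with
    | 0 => exact pv_not_prefix_cons
    | i + 1 =>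
      rw [pv_prefix_drop]
      intro hp
      have : PySem.Chars.find t pvSep ≠ -1 := by
        rw [PySem.Chars.find_ne_neg_one_iff]
        exact (PySem.Chars.isIn_iff_infix pvSep t).mp
          ((PySem.Chars.exists_prefix_drop_iff_isIn (sub := pvSep) (s := t)).mp ⟨i, hp⟩)
      exact this h
  · rw [if_neg h]
    have hge : 0 ≤ PySem.Chars.find t pvSep := by
      have := PySem.Chars.neg_one_le_find (s := t) (sub := pvSep)
      omega
    obtain ⟨hp, hmin⟩ := PySem.Chars.find_spec hge
    have := pv_find_eq (s := '<' :: t) (k := (PySem.Chars.find t pvSep).toNat + 1)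
      (by rw [pv_prefix_drop]; exact hp)
      (by
        intro i hi
        match i with
        | 0 => exact pv_not_prefix_cons
        | i + 1 =>
          rw [pv_prefix_drop]
          exact hmin i (by omega))
    rw [this]
    omega

theorem pv_pvSplit_ne_nil (s : List Char) : pvSplit s ≠ [] := by
  rw [pvSplit]
  by_cases h : PySem.Chars.find s pvSep < 0 <;> simp [h]

theorem pv_pvSplit_cons (t : List Char) :
    pvSplit ('<' :: t) =
      match pvSplit t with
      | [] => []
      | p :: ps => ('<' :: p) :: ps := by
  by_cases h : PySem.Chars.find t pvSep = -1
  · conv_lhs => rw [pvSplit]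
    conv_rhs => rw [pvSplit]
    rw [pv_find_cons, if_pos h]
    rw [dif_pos (by norm_num), dif_pos (by rw [h]; norm_num)]
  · have hge : 0 ≤ PySem.Chars.find t pvSep := by
      have := PySem.Chars.neg_one_le_find (s := t) (sub := pvSep)
      omega
    conv_lhs => rw [pvSplit]
    conv_rhs => rw [pvSplit]
    rw [pv_find_cons, if_neg h]
    rw [dif_neg (by omega), dif_neg (by omega)]
    have ht : (PySem.Chars.find t pvSep + 1).toNat = (PySem.Chars.find t pvSep).toNat + 1 := by omega
    rw [ht]
    simp only [List.take_succ_cons, List.drop_succ_cons]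

theorem pv_segs_eq_rest : ∀ (n : Nat) (t : List Char), t.length ≤ n →
    pvSegs ('<' :: t) = pvRest (pvSplit t) := by
  intro n
  induction n with
  | zero =>
    intro t ht
    have : t = [] := List.eq_nil_of_length_eq_zero (by omega)
    subst this
    rw [pvSegs, pvSplit]
    have h1 : PySem.Chars.find ['<'] pvSep = -1 := by decide
    have h2 : PySem.Chars.find ([] : List Char) pvSep = -1 := by decide
    simp [h1, h2, pvRest]
  | succ n ih =>
    intro t ht
    by_cases h : PySem.Chars.find t pvSep = -1
    · rw [pvSegs, pvSplit, pv_find_cons, if_pos h]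
      simp [h, pvRest]
    · have hge : 0 ≤ PySem.Chars.find t pvSep := by
        have := PySem.Chars.neg_one_le_find (s := t) (sub := pvSep)
        omega
      obtain ⟨hp, -⟩ := PySem.Chars.find_spec hge
      set f : Nat := (PySem.Chars.find t pvSep).toNat with hf
      obtain ⟨u, hu⟩ := hp
      have hlen := pv_find_nonneg_len (s := t) hge
      -- t.drop f = '>' :: '<' :: u
      have hdropf : t.drop f = '>' :: '<' :: u := by simpa [pvSep] using hu.symm
      have hdropf1 : t.drop (f + 1) = '<' :: u := by
        rw [← List.drop_drop]  -- careful with order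
        rw [hdropf]
        rfl
      have hdropf2 : t.drop (f + 2) = u := by
        rw [show f + 2 = (f+1) + 1 by omega, ← List.drop_drop, hdropf1]
        rfl
      have hget : t[f]? = some '>' := by
        have h0 : (List.drop f t)[0]? = t[f + 0]? := List.getElem?_drop
        rw [hdropf] at h0
        simpa using h0.symm
      have htake1 : t.take (f + 1) = t.take f ++ ['>'] := by
        rw [List.take_add_one, hget]
        rfl
      rw [pvSegs, pv_find_cons, if_neg h]
      rw [dif_neg (by omega)]
      have ht1 : (PySem.Chars.find t pvSep + 1).toNat + 1 = f + 2 := by omega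
      rw [ht1]
      have htake2 : ('<' :: t).take (f + 2) = '<' :: t.take (f + 1) := by
        simp [List.take_succ_cons]
      have hdrop2 : ('<' :: t).drop (f + 2) = t.drop (f + 1) := by
        simp [show f + 2 = (f + 1) + 1 by omega, List.drop_succ_cons]
      rw [htake2, hdrop2, hdropf1]
      rw [ih u (by
        have : (t.drop (f+2)).length = t.length - (f+2) := by simp
        rw [hdropf2] at this
        omega)]
      conv_rhs => rw [pvSplit]
      rw [dif_neg (by omega)]
      rw [hdropf2, pvRest]
      have hne : pvSplit u ≠ [] := pv_pvSplit_ne_nil _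
      rw [htake1]
      simp [List.isEmpty_iff, hne]
      omega

theorem pv_loopA (s : List Char) : ∀ (fuel : Nat) (last : Int) (ret : List String),
    1 ≤ last → last.toNat ≤ s.length → (s.drop last.toNat).length < fuel →
    fieldPosKrLoopA s fuel last ret = ret ++ (pvSegs (s.drop last.toNat)).map String.ofList := by
  intro fuel
  induction fuel with
  | zero => intro last ret h1 h2 h3; omega
  | succ fuel ih =>
    intro last ret h1 h2 h3
    have hcast : ((last.toNat : Nat) : Int) = last := Int.toNat_of_nonneg (by omega)
    have hff : PySem.Chars.findFrom s pvSep last =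
        (if PySem.Chars.find (s.drop last.toNat) pvSep = -1 then -1
         else (last.toNat : Int) + PySem.Chars.find (s.drop last.toNat) pvSep) := by
      rw [← hcast]
      exact PySem.Chars.findFrom_natCast s pvSep last.toNat h2
    have hge1 : -1 ≤ PySem.Chars.find (s.drop last.toNat) pvSep :=
      PySem.Chars.neg_one_le_find _ _
    simp only [fieldPosKrLoopA]
    rw [show (['>', '<'] : List Char) = pvSep from rfl, hff]
    by_cases hf : PySem.Chars.find (s.drop last.toNat) pvSep = -1
    · rw [if_pos hf, if_neg (by norm_num)]
      rw [PySem.List.slice_from s (by omega)]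
      rw [pvSegs, dif_pos (by rw [hf]; norm_num)]
      simp
    · rw [if_neg hf]
      set f := PySem.Chars.find (s.drop last.toNat) pvSep with hfdef
      have hge : 0 ≤ f := by omega
      have hlen2 := pv_find_nonneg_len (s := s.drop last.toNat) hge
      have hdl : (s.drop last.toNat).length = s.length - last.toNat := by simp
      rw [if_pos (by omega)]
      have harg : ((last.toNat : Int) + f + 1).toNat = last.toNat + f.toNat + 1 := by omega
      rw [ih ((last.toNat : Int) + f + 1) _ (by omega) (by omega) ?_]
      · rw [harg]
        have hdd : s.drop (last.toNat + f.toNat + 1) = (s.drop last.toNat).drop (f.toNat + 1) := by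
          rw [List.drop_drop]
          congr 1
        rw [hdd]
        conv_rhs => rw [pvSegs, dif_neg (by omega)]
        rw [← hfdef]
        rw [PySem.List.slice_toNat s (by omega) (by omega)]
        have hsub : ((last.toNat : Int) + f + 1).toNat - last.toNat = f.toNat + 1 := by omega
        rw [hsub]
        simp
      · rw [harg]
        simp only [List.length_drop]
        omega

theorem pv_enum_map (nv : Int) : ∀ (ps : List (List Char)) (k : Int), 1 ≤ k → k + ps.length = nv →
    (PySem.List.enumerate ps k).map (fun ip =>
      String.ofList ((if ip.1 ≠ 0 then ['<'] else []) ++ ip.2 ++ (if ip.1 < nv - 1 then ['>'] else []))) =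
    (pvRest ps).map String.ofList := by
  intro ps
  induction ps with
  | nil => intro k h1 h2; simp [pvRest, PySem.List.enumerate_nil]
  | cons q qs ih =>
    intro k h1 h2
    have h2' : k + (qs.length : Int) + 1 = nv := by
      simp only [List.length_cons] at h2
      push_cast at h2 ⊢
      omega
    rw [PySem.List.enumerate_cons]
    simp only [List.map_cons, pvRest]
    congr 1
    · rcases qs with _ | ⟨r, rs⟩
      · have h2n : k + 1 = nv := by
          have : ((([] : List (List Char)).length : Int)) = 0 := by simp
          rw [this] at h2'
          omega
        have hkn : ¬ (k < nv - 1) := by omega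
        have hk0 : k ≠ 0 := by omega
        simp [hkn, hk0]
      · have hkn : k < nv - 1 := by simp only [List.length_cons] at h2'; push_cast at h2'; omega
        have hk0 : k ≠ 0 := by omega
        simp [hkn, hk0]
    · exact ih (k + 1) (by omega) (by omega)

theorem pv_main (fields : List String) (hpre : 3 ≤ fields.length) :
    field_pos_kr fields = field_pos_kr_alt fields := by
  rcases fields with _ | ⟨a, _ | ⟨b, _ | ⟨c, rest⟩⟩⟩ <;> simp at hpre
  have hget : PySem.List.pyGet? (a :: b :: c :: rest) (2 : Int) = some c := by simp [pysem]
  rw [field_pos_kr, field_pos_kr_alt, hget]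
  simp only
  set s : List Char := c.toList with hs
  set idx := PySem.Chars.find s ['<'] with hidx
  by_cases hpos : 0 < idx
  · rw [if_pos hpos, if_neg (by omega)]
    have hge : 0 ≤ idx := by omega
    have hle : idx.toNat ≤ s.length := by
      have := PySem.Chars.find_le_length s ['<']
      omega
    obtain ⟨hp, -⟩ := PySem.Chars.find_spec (s := s) (sub := ['<']) (by omega)
    rw [pv_loopA s (s.length + 1) idx _ (by omega) hle (by simp only [List.length_drop]; omega)]
    rw [PySem.List.slice_to s hge]
    obtain ⟨t, ht⟩ : ∃ t, s.drop idx.toNat = '<' :: t := by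
      obtain ⟨u, hu⟩ := hp
      exact ⟨u, by rw [← hu]; rfl⟩
    rw [ht]
    rw [show (['>', '<'] : List Char) = pvSep from rfl, pv_splitOn_eq, pv_pvSplit_cons]
    obtain ⟨p, ps, hps⟩ : ∃ p ps, pvSplit t = p :: ps := by
      rcases hx : pvSplit t with _ | ⟨p, ps⟩
      · exact absurd hx (pv_pvSplit_ne_nil t)
      · exact ⟨p, ps, rfl⟩
    rw [hps, pv_segs_eq_rest t.length t le_rfl, hps]
    rw [PySem.List.enumerate_cons]
    simp only [List.map_cons, List.singleton_append, pvRest, List.cons.injEq]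
    refine ⟨trivial, ?_, ?_⟩
    · rcases ps with _ | ⟨r, rs⟩
      · norm_num
      · simp
    · rw [show (0 : Int) + 1 = 1 from rfl]
      exact (pv_enum_map ((('<' :: p) :: ps).length : Int) ps 1 (by omega)
        (by simp only [List.length_cons]; push_cast; omega)).symm
  · rw [if_neg hpos, if_pos (by omega)]

-- ===== VERDICT (by name: the statement is the Claim_ definition above) =====
theorem field_pos_kr_spec : Claim_equal_field_pos_kr := by
  intro fields _ hpre
  unfold Spec_field_pos_kr
  exact pv_main fields hpre
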